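-- pv_equiv track=rewrite | github.com/royashcenazi/parsigs | parsigs/parse_sig_api.py | _get_frequency_type
-- ===== SOURCE A (Python) =====
-- def _get_frequency_type(frequency):
--     if frequency is not None:
--         if "hour" in frequency:
--             return "Hour"
--         if "week" in frequency:
--             return "Week"
--         if "month" in frequency:
--             return "Month"
--         if "year" in frequency:
--             return "Year"
--         if any(daily_instruction in frequency for daily_instruction in
--                ("day", "daily", "night", "morning", "evening", "noon", "bedtime")):
--             return "Day"
-- ===== SOURCE B (Python) =====
-- _KEYWORDS = (
--     ("hour", "Hour"), ("week", "Week"), ("month", "Month"), ("year", "Year"),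
--     ("day", "Day"), ("daily", "Day"), ("night", "Day"), ("morning", "Day"),
--     ("evening", "Day"), ("noon", "Day"), ("bedtime", "Day"),
-- )
-- _PRIORITY = ("Hour", "Week", "Month", "Year", "Day")
--
--
-- def _get_frequency_type(frequency):
--     if frequency is None:
--         return None
--     found = set()
--     for i in range(len(frequency)):
--         for kw, label in _KEYWORDS:
--             if frequency.startswith(kw, i):
--                 found.add(label)
--     for label in _PRIORITY:
--         if label in found:
--             return label
--     return None
-- ===== Notes on version B (the rewrite author's own statement) =====
-- stated objective: alternative
-- what changed: B makes one left-to-right sweep over the string, testing at each position which keyword starts there and accumulating the matched labels in a set, then resolves the winner by a separate priority pass, instead of A's chain of independent whole-string substring searches per keyword.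
import Mathlib
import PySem

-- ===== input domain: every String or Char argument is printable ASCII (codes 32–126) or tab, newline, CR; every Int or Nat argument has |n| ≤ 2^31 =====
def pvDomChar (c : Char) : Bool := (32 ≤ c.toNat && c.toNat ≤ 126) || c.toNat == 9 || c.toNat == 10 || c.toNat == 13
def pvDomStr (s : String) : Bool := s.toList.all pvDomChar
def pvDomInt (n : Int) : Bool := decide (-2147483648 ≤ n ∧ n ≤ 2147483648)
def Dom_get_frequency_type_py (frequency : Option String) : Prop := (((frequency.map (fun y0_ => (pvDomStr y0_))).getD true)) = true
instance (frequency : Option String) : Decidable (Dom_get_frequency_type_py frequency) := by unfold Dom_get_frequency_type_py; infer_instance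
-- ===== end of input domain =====

-- B makes one sweep over string positions collecting matched labels in a set, then a priority pass (alternative; same cost).


-- ===== PORT A =====
def get_frequency_type_py (frequency : Option String) : Option String :=
  match frequency with
  | none => none
  | some f =>
    if PySem.Str.isIn "hour" f then some "Hour"
    else if PySem.Str.isIn "week" f then some "Week"
    else if PySem.Str.isIn "month" f then some "Month"
    else if PySem.Str.isIn "year" f then some "Year"
    else if ["day", "daily", "night", "morning", "evening", "noon", "bedtime"].any
        (fun daily_instruction => PySem.Str.isIn daily_instruction f) then some "Day"
    else none

-- ===== PORT B =====
def kwTable : List (String × String) :=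
  [("hour", "Hour"), ("week", "Week"), ("month", "Month"), ("year", "Year"),
   ("day", "Day"), ("daily", "Day"), ("night", "Day"), ("morning", "Day"),
   ("evening", "Day"), ("noon", "Day"), ("bedtime", "Day")]

def priorityList : List String := ["Hour", "Week", "Month", "Year", "Day"]

-- frequency.startswith(kw, i) for 0 ≤ i : exact as kw.toList.isPrefixOf (f.drop i.toNat)
def scanFound (f : List Char) : PySem.Set String :=
  (PySem.List.pyRange 0 f.length 1).foldl
    (fun acc i =>
      kwTable.foldl
        (fun acc2 p => if p.1.toList.isPrefixOf (f.drop i.toNat) then PySem.Set.add acc2 p.2 else acc2)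
        acc)
    PySem.Set.empty

def get_frequency_type_py_alt (frequency : Option String) : Option String :=
  match frequency with
  | none => none
  | some f =>
    let found := scanFound f.toList
    priorityList.find? (fun label => PySem.Set.contains found label)

-- ===== PRECONDITION & SPEC =====
def Spec_get_frequency_type_py (frequency : Option String) (out : Option String) : Prop := out = get_frequency_type_py_alt frequency
instance (frequency : Option String) (out : Option String) : Decidable (Spec_get_frequency_type_py frequency out) := by unfold Spec_get_frequency_type_py; infer_instance

-- ===== CLAIM =====
def Claim_equal_get_frequency_type_py : Prop := ∀ (frequency : Option String), Dom_get_frequency_type_py frequency → Spec_get_frequency_type_py frequency (get_frequency_type_py frequency)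

-- ===== LEMMAS AND PROOFS =====
theorem mem_inner_foldl (tbl : List (String × String)) (acc : PySem.Set String) (l : String) (d : List Char) :
    l ∈ tbl.foldl (fun a p => if p.1.toList.isPrefixOf d then PySem.Set.add a p.2 else a) acc
      ↔ l ∈ acc ∨ ∃ p ∈ tbl, p.1.toList.isPrefixOf d ∧ p.2 = l := by
  induction tbl generalizing acc with
  | nil => simp
  | cons q t ih =>
    simp only [List.foldl_cons, ih, List.exists_mem_cons_iff]
    by_cases h : q.1.toList.isPrefixOf d = true
    · simp only [h, if_true, PySem.Set.mem_add, true_and, eq_comm]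
      tauto
    · simp only [h, if_false, Bool.false_eq_true, false_and]
      tauto

theorem mem_outer_foldl (f : List Char) (ps : List Int) (acc : PySem.Set String) (l : String) :
    l ∈ ps.foldl (fun a i =>
        kwTable.foldl
          (fun acc2 p => if p.1.toList.isPrefixOf (f.drop i.toNat) then PySem.Set.add acc2 p.2 else acc2) a) acc
      ↔ l ∈ acc ∨ ∃ i ∈ ps, ∃ p ∈ kwTable, p.1.toList.isPrefixOf (f.drop i.toNat) ∧ p.2 = l := by
  induction ps generalizing acc with
  | nil => simp
  | cons i t ih =>
    simp only [List.foldl_cons, ih, mem_inner_foldl, List.exists_mem_cons_iff]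
    exact or_assoc

theorem kwTable_fst_ne_nil : ∀ p ∈ kwTable, p.1.toList ≠ [] := by decide

theorem mem_scanFound (f : List Char) (l : String) :
    l ∈ scanFound f ↔ ∃ j : Nat, ∃ p ∈ kwTable, p.1.toList.isPrefixOf (f.drop j) ∧ p.2 = l := by
  unfold scanFound
  rw [mem_outer_foldl]
  simp only [PySem.Set.empty]
  constructor
  · rintro (h | ⟨i, hi, p, hp, hpre, hl⟩)
    · simp at h
    · exact ⟨i.toNat, p, hp, hpre, hl⟩
  · rintro ⟨j, p, hp, hpre, hl⟩
    right
    have hj : j < f.length := by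
      by_contra hge
      have : f.drop j = [] := List.drop_eq_nil_of_le (by omega)
      rw [this] at hpre
      have := List.isPrefixOf_iff_prefix.mp hpre
      have := List.prefix_nil.mp this
      exact kwTable_fst_ne_nil p hp this
    refine ⟨(j : Int), ?_, p, hp, by simpa using hpre, hl⟩
    rw [PySem.List.mem_pyRange_one]
    constructor <;> [positivity; exact_mod_cast hj]

theorem contains_scan_hour (f : String) :
    PySem.Set.contains (scanFound f.toList) "Hour" = PySem.Str.isIn "hour" f := by
  rw [Bool.eq_iff_iff, PySem.Set.contains_iff, mem_scanFound, PySem.Str.isIn_eq,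
    ← PySem.Chars.exists_prefix_drop_iff_isIn]
  simp [kwTable, List.isPrefixOf_iff_prefix]

theorem contains_scan_week (f : String) :
    PySem.Set.contains (scanFound f.toList) "Week" = PySem.Str.isIn "week" f := by
  rw [Bool.eq_iff_iff, PySem.Set.contains_iff, mem_scanFound, PySem.Str.isIn_eq,
    ← PySem.Chars.exists_prefix_drop_iff_isIn]
  simp [kwTable, List.isPrefixOf_iff_prefix]

theorem contains_scan_month (f : String) :
    PySem.Set.contains (scanFound f.toList) "Month" = PySem.Str.isIn "month" f := by
  rw [Bool.eq_iff_iff, PySem.Set.contains_iff, mem_scanFound, PySem.Str.isIn_eq,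
    ← PySem.Chars.exists_prefix_drop_iff_isIn]
  simp [kwTable, List.isPrefixOf_iff_prefix]

theorem contains_scan_year (f : String) :
    PySem.Set.contains (scanFound f.toList) "Year" = PySem.Str.isIn "year" f := by
  rw [Bool.eq_iff_iff, PySem.Set.contains_iff, mem_scanFound, PySem.Str.isIn_eq,
    ← PySem.Chars.exists_prefix_drop_iff_isIn]
  simp [kwTable, List.isPrefixOf_iff_prefix]

theorem contains_scan_day (f : String) :
    PySem.Set.contains (scanFound f.toList) "Day" =
      (PySem.Str.isIn "day" f || (PySem.Str.isIn "daily" f || (PySem.Str.isIn "night" f ||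
       (PySem.Str.isIn "morning" f || (PySem.Str.isIn "evening" f || (PySem.Str.isIn "noon" f ||
       PySem.Str.isIn "bedtime" f)))))) := by
  rw [Bool.eq_iff_iff, PySem.Set.contains_iff, mem_scanFound]
  simp only [PySem.Str.isIn_eq, Bool.or_eq_true, ← PySem.Chars.exists_prefix_drop_iff_isIn]
  simp [kwTable, List.isPrefixOf_iff_prefix, exists_or]

-- ===== VERDICT =====
theorem get_frequency_type_py_spec : Claim_equal_get_frequency_type_py := by
  intro frequency _
  unfold Spec_get_frequency_type_py
  cases frequency with
  | none => rfl
  | some f =>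
    show _ = get_frequency_type_py_alt (some f)
    unfold get_frequency_type_py get_frequency_type_py_alt priorityList
    simp only [List.find?, List.any_cons, List.any_nil, Bool.or_false,
      contains_scan_hour, contains_scan_week, contains_scan_month,
      contains_scan_year, contains_scan_day]
    cases h1 : PySem.Str.isIn "hour" f <;>
    cases h2 : PySem.Str.isIn "week" f <;>
    cases h3 : PySem.Str.isIn "month" f <;>
    cases h4 : PySem.Str.isIn "year" f <;>
    cases h5 : (PySem.Str.isIn "day" f || (PySem.Str.isIn "daily" f || (PySem.Str.isIn "night" f ||
       (PySem.Str.isIn "morning" f || (PySem.Str.isIn "evening" f || (PySem.Str.isIn "noon" f ||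
       PySem.Str.isIn "bedtime" f)))))) <;>
    simp_all
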